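-- pv_equiv track=rewrite | github.com/nicovince/MagicHexagon | magic_hexagon_solver.py | getMiddleSolution
-- ===== SOURCE A (Python) =====
-- def getMiddleSolution(listCouple, candidates):
--     middles = []
--     for c in listCouple:
--         v = getFinalVal(c)
--         if (v not in candidates) or (v in middles):
--             return None
--         else:
--             middles.append(v)
--     return middles
--
-- def getFinalVal(c):
--     return 38-sum(c)
-- ===== SOURCE B (Python) =====
-- def getMiddleSolution(listCouple, candidates):
--     middles = [38 - sum(c) for c in listCouple]
--     if any(v not in candidates for v in middles):
--         return None
--     s = sorted(middles)
--     if any(x == y for x, y in zip(s, s[1:])):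
--         return None
--     return middles
-- ===== Notes on version B (the rewrite author's own statement) =====
-- stated objective: alternative
-- what changed: A's single interleaved early-exit loop with incremental 'v in middles' duplicate scans is replaced by map-then-validate with a SORT-based duplicate test: build all middles, check candidate membership in one pass, then sort the middles and detect any duplicate as two equal adjacent elements of the sorted list.
import Mathlib
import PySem

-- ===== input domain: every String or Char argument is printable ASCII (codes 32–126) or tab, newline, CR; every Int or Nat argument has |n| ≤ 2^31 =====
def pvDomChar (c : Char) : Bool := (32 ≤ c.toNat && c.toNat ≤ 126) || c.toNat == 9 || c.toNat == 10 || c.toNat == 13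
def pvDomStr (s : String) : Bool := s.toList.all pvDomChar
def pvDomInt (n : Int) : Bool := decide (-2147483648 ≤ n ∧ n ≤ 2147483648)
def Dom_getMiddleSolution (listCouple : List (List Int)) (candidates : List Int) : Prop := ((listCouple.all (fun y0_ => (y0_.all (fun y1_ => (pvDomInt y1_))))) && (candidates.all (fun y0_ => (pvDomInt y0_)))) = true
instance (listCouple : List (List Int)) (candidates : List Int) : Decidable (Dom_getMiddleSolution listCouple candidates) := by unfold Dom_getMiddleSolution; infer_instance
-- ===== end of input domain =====

-- B replaces A's interleaved early-exit loop (incremental list-scan duplicate checks) by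
-- map-then-validate with a SORT-based duplicate test (equal adjacent elements of sorted(middles));
-- A and B return the same value everywhere, so equivalence is proved on the whole domain.

-- ===== PORT A =====
def getFinalVal (c : List Int) : Int := 38 - c.sum

def getMiddleSolutionLoop (candidates : List Int) : List (List Int) → List Int → Option (List Int)
  | [], middles => some middles
  | c :: rest, middles =>
    let v := getFinalVal c
    if (!(candidates.contains v)) || middles.contains v then none
    else getMiddleSolutionLoop candidates rest (middles ++ [v])

def getMiddleSolution (listCouple : List (List Int)) (candidates : List Int) : Option (List Int) :=
  getMiddleSolutionLoop candidates listCouple []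

-- ===== PORT B =====
def getMiddleSolution_alt (listCouple : List (List Int)) (candidates : List Int) : Option (List Int) :=
  let middles := listCouple.map (fun c : List Int => 38 - c.sum)
  if middles.any (fun v => !(candidates.contains v)) then none
  else
    let s := PySem.List.sorted middles (fun x => x) false
    if (s.zip (PySem.List.slice s (some 1) none)).any (fun p => p.1 == p.2) then none
    else some middles

-- ===== PRECONDITION & SPEC =====
def Spec_getMiddleSolution (listCouple : List (List Int)) (candidates : List Int) (out : Option (List Int)) : Prop := out = getMiddleSolution_alt listCouple candidates
instance (listCouple : List (List Int)) (candidates : List Int) (out : Option (List Int)) : Decidable (Spec_getMiddleSolution listCouple candidates out) := by unfold Spec_getMiddleSolution; infer_instance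

-- ===== CLAIM =====
def Claim_equal_getMiddleSolution : Prop := ∀ (listCouple : List (List Int)) (candidates : List Int), Dom_getMiddleSolution listCouple candidates → Spec_getMiddleSolution listCouple candidates (getMiddleSolution listCouple candidates)

-- ===== LEMMAS AND PROOFS =====

-- the adjacent-equality scan over zip(s, s[1:]) is exactly the Chain' (· ≠ ·) test
theorem zip_adj_eq_false_iff_chain' (s : List Int) :
    ((s.zip s.tail).any (fun p => p.1 == p.2) = false) ↔ s.IsChain (· ≠ ·) := by
  induction s with
  | nil => simp
  | cons a t ih =>
    cases t with
    | nil => simp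
    | cons b u =>
      simp only [List.tail_cons, List.zip_cons_cons, List.any_cons, Bool.or_eq_false_iff,
        beq_eq_false_iff_ne, List.isChain_cons_cons] at *
      constructor
      · rintro ⟨h1, h2⟩; exact ⟨h1, ih.mp h2⟩
      · rintro ⟨h1, h2⟩; exact ⟨h1, ih.mpr h2⟩

-- on a (≤)-sorted list, no equal adjacent pair is the same as Nodup
theorem isChain_lt_of_le_ne (s : List Int) (hle : s.IsChain (· ≤ ·))
    (hne : s.IsChain (· ≠ ·)) : s.IsChain (· < ·) := by
  induction s with
  | nil => exact List.IsChain.nil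
  | cons a t ih =>
    cases t with
    | nil => simp
    | cons b u =>
      rw [List.isChain_cons_cons] at *
      exact ⟨lt_of_le_of_ne hle.1 hne.1, ih hle.2 hne.2⟩

theorem chain'_ne_iff_nodup (s : List Int) (hp : s.Pairwise (· ≤ ·)) :
    s.IsChain (· ≠ ·) ↔ s.Nodup := by
  constructor
  · intro hc
    exact (List.isChain_iff_pairwise.mp (isChain_lt_of_le_ne s hp.isChain hc)).imp ne_of_lt
  · intro hn
    exact hn.isChain

-- B's sorted adjacent check computes the Nodup of middles
theorem sorted_adj_check (ms : List Int) :
    (((PySem.List.sorted ms (fun x => x) false).zip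
        (PySem.List.sorted ms (fun x => x) false).tail).any (fun p => p.1 == p.2) = false)
      ↔ ms.Nodup := by
  have hperm : (PySem.List.sorted ms (fun x => x) false).Perm ms := PySem.List.sorted_perm ms _ _
  have hp : (PySem.List.sorted ms (fun x => x) false).Pairwise (· ≤ ·) := by
    simpa using PySem.List.sorted_pairwise ms (fun x => x)
  rw [zip_adj_eq_false_iff_chain', chain'_ne_iff_nodup _ hp, hperm.nodup_iff]

-- A's loop computes: all middles allowed and (acc ++ middles) duplicate-free
theorem loop_characterisation (candidates : List Int) (l : List (List Int)) :
    ∀ acc : List Int, acc.Nodup →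
      getMiddleSolutionLoop candidates l acc =
        if ((l.map (fun c : List Int => 38 - c.sum)).all (fun v => candidates.contains v) = true
              ∧ (acc ++ l.map (fun c : List Int => 38 - c.sum)).Nodup)
        then some (acc ++ l.map (fun c : List Int => 38 - c.sum)) else none := by
  induction l with
  | nil =>
    intro acc hacc
    simp [getMiddleSolutionLoop, hacc]
  | cons c rest ih =>
    intro acc hacc
    simp only [getMiddleSolutionLoop, getFinalVal]
    by_cases h1 : candidates.contains (38 - c.sum) = true
    · by_cases h2 : acc.contains (38 - c.sum) = true
      · have hvacc : (38 - c.sum) ∈ acc := by simpa using h2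
        rw [if_pos (by simp; exact Or.inr hvacc)]
        rw [if_neg]
        rintro ⟨-, hnd⟩
        rw [List.map_cons, List.nodup_append] at hnd
        have := hnd.2.2 _ hvacc
        simp at this
      · have hvacc : (38 - c.sum) ∉ acc := by simpa using h2
        rw [if_neg (by simp; exact ⟨by simpa using h1, hvacc⟩)]
        have hacc' : (acc ++ [38 - c.sum]).Nodup := by
          rw [List.nodup_append]
          refine ⟨hacc, List.nodup_singleton _, ?_⟩
          intro a ha b hb
          simp only [List.mem_singleton] at hb
          subst hb
          exact fun hab => hvacc (hab ▸ ha)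
        rw [ih (acc ++ [38 - c.sum]) hacc']
        apply if_congr
        · simp only [List.map_cons, List.all_cons, h1, Bool.true_and, ← List.append_cons]
        · simp
        · rfl
    · rw [if_pos (by simp; exact Or.inl (by simpa using h1))]
      rw [if_neg]
      rintro ⟨hall, -⟩
      simp only [List.map_cons, List.all_cons, Bool.and_eq_true] at hall
      exact h1 hall.1

theorem getMiddleSolution_eq_alt (listCouple : List (List Int)) (candidates : List Int) :
    getMiddleSolution listCouple candidates = getMiddleSolution_alt listCouple candidates := by
  unfold getMiddleSolution getMiddleSolution_alt
  rw [loop_characterisation candidates listCouple [] List.nodup_nil]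
  simp only [List.nil_append, PySem.List.slice_from_one]
  set ms := listCouple.map (fun c : List Int => 38 - c.sum) with hms
  by_cases hall : ms.all (fun v => candidates.contains v) = true
  · have hany : ms.any (fun v => !(candidates.contains v)) = false := by
      rw [List.any_eq_false]
      intro x hx
      have hc := List.all_eq_true.mp hall x hx
      simpa using hc
    have hB1 : ¬ (ms.any (fun v => !(candidates.contains v)) = true) := by
      rw [hany]; exact Bool.false_ne_true
    by_cases hnd : ms.Nodup
    · rw [if_pos ⟨hall, hnd⟩, if_neg hB1, if_neg]
      rw [(sorted_adj_check ms).mpr hnd]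
      exact Bool.false_ne_true
    · rw [if_neg (fun h => hnd h.2), if_neg hB1, if_pos]
      rcases Bool.eq_false_or_eq_true (((PySem.List.sorted ms (fun x => x) false).zip
          (PySem.List.sorted ms (fun x => x) false).tail).any (fun p => p.1 == p.2)) with ht | hf
      · exact ht
      · exact absurd ((sorted_adj_check ms).mp hf) hnd
  · rw [if_neg (fun h => hall h.1), if_pos]
    rw [List.all_eq_true] at hall
    push Not at hall
    obtain ⟨x, hx, hxc⟩ := hall
    rw [List.any_eq_true]
    exact ⟨x, hx, by simpa using hxc⟩

-- ===== VERDICT =====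
theorem getMiddleSolution_spec : Claim_equal_getMiddleSolution := by
  intro listCouple candidates _
  exact getMiddleSolution_eq_alt listCouple candidates
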